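-- pv_equiv track=rewrite | github.com/mnurzia/re | tools/unicode_data.py | perform_squish
-- ===== SOURCE A (Python) =====
-- def perform_squish(arrangement, leads, trails, blocks):
--     out = []
--     locs = []
--     lastidx = None
--     for idx in arrangement:
--         if lastidx == None:
--             out.extend(blocks[idx])
--             locs.append(0)
--         else:
--             trail = trails[lastidx]
--             lead = leads[idx]
--             if trail[0] == lead[0]:
--                 moveup = min(trail[1], lead[1])
--             else:
--                 moveup = 0
--             locs.append(len(out) - moveup)
--             out.extend(blocks[idx][moveup:])
--         lastidx = idx
--     return out, locs
-- ===== SOURCE B (Python) =====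
-- def perform_squish(arrangement, leads, trails, blocks):
--     if not arrangement:
--         return [], []
--     first, rest = arrangement[0], arrangement[1:]
--     # overlap of every adjacent pair
--     moveups = [min(trails[p][1], leads[c][1]) if trails[p][0] == leads[c][0] else 0
--                for p, c in zip(arrangement, rest)]
--     # the squished output is just the concatenation of these pieces
--     pieces = [blocks[first]] + [blocks[c][m:] for c, m in zip(rest, moveups)]
--     # locs come from the prefix sums of the piece lengths, shifted back by the overlap
--     offsets = [0]
--     for piece in pieces[:-1]:
--         offsets.append(offsets[-1] + len(piece))
--     locs = [0] + [off - m for off, m in zip(offsets[1:], moveups)]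
--     out = [x for piece in pieces for x in piece]
--     return out, locs
-- ===== Notes on version B (the rewrite author's own statement) =====
-- stated objective: alternative
-- what changed: Instead of A's stateful loop that appends to a growing out list and reads len(out) for each loc, B builds the list of slice 'pieces' the result is a concatenation of, flattens them for out, and computes locs arithmetically from the prefix sums of the piece lengths shifted by the precomputed overlaps.
import Mathlib
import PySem

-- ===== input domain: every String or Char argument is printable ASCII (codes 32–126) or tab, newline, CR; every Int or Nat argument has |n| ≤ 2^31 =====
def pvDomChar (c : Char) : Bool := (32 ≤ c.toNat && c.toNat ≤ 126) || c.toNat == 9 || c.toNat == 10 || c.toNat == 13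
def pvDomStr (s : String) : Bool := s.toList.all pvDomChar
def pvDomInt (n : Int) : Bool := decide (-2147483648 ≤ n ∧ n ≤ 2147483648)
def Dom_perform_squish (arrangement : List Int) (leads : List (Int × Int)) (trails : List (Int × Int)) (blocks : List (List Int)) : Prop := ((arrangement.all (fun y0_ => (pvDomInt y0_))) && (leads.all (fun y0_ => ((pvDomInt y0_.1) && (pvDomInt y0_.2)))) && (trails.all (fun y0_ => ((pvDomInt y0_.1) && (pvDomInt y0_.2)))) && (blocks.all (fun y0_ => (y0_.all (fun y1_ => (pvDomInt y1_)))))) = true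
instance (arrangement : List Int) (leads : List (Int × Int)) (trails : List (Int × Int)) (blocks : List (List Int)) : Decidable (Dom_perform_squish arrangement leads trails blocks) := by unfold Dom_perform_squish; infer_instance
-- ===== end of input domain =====

-- B replaces A's stateful out/locs loop (which reads len(out) each step) by a piece-list
-- decomposition: build the slice pieces, flatten them for out, and derive locs from prefix
-- sums of piece lengths; objective: alternative (same cost, different assembly).


-- ===== PORT A =====
-- A's loop step: state (out, locs, lastidx); indexing via pyGetD (Pre_ guarantees in range).
def pvAStep (leads : List (Int × Int)) (trails : List (Int × Int)) (blocks : List (List Int))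
    (s : List Int × List Int × Option Int) (idx : Int) : List Int × List Int × Option Int :=
  match s.2.2 with
  | none => (s.1 ++ PySem.List.pyGetD blocks idx [], s.2.1 ++ [0], some idx)
  | some lastidx =>
      let trail := PySem.List.pyGetD trails lastidx (0, 0)
      let lead := PySem.List.pyGetD leads idx (0, 0)
      let moveup := if trail.1 = lead.1 then min trail.2 lead.2 else 0
      (s.1 ++ PySem.List.slice (PySem.List.pyGetD blocks idx []) (some moveup) none,
       s.2.1 ++ [(s.1.length : Int) - moveup], some idx)

def perform_squish (arrangement : List Int) (leads : List (Int × Int)) (trails : List (Int × Int)) (blocks : List (List Int)) : List Int × List Int :=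
  let st := arrangement.foldl (pvAStep leads trails blocks) ([], [], none)
  (st.1, st.2.1)

-- ===== PORT B =====
-- overlap of one adjacent pair (prev, cur)
def pvMoveup (leads : List (Int × Int)) (trails : List (Int × Int)) (pc : Int × Int) : Int :=
  let trail := PySem.List.pyGetD trails pc.1 (0, 0)
  let lead := PySem.List.pyGetD leads pc.2 (0, 0)
  if trail.1 = lead.1 then min trail.2 lead.2 else 0

-- one tail piece: blocks[c][m:]
def pvPiece (blocks : List (List Int)) (cm : Int × Int) : List Int :=
  PySem.List.slice (PySem.List.pyGetD blocks cm.1 []) (some cm.2) none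

def perform_squish_alt (arrangement : List Int) (leads : List (Int × Int)) (trails : List (Int × Int)) (blocks : List (List Int)) : List Int × List Int :=
  match arrangement with
  | [] => ([], [])
  | first :: rest =>
      let moveups := ((first :: rest).zip rest).map (pvMoveup leads trails)
      let pieces := PySem.List.pyGetD blocks first [] :: (rest.zip moveups).map (pvPiece blocks)
      let offsets := pieces.dropLast.foldl (fun os p => os ++ [os.getLastD 0 + (p.length : Int)]) [(0 : Int)]
      let locs := (0 : Int) :: (offsets.tail.zip moveups).map (fun om => om.1 - om.2)
      (pieces.flatMap id, locs)

-- ===== PRECONDITION & SPEC =====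
-- Pre_ excludes exactly the inputs on which Python A raises IndexError: some blocks[idx],
-- trails[lastidx] or leads[idx] access is out of range.
def Pre_perform_squish (arrangement : List Int) (leads : List (Int × Int)) (trails : List (Int × Int)) (blocks : List (List Int)) : Prop :=
  (∀ i ∈ arrangement, PySem.Raise.InRange blocks.length i) ∧
  (∀ i ∈ arrangement.dropLast, PySem.Raise.InRange trails.length i) ∧
  (∀ i ∈ arrangement.tail, PySem.Raise.InRange leads.length i)
instance (arrangement : List Int) (leads : List (Int × Int)) (trails : List (Int × Int)) (blocks : List (List Int)) : Decidable (Pre_perform_squish arrangement leads trails blocks) := by unfold Pre_perform_squish; infer_instance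

def pvWitness_perform_squish : List Int × (List (Int × Int)) × (List (Int × Int)) × List (List Int) :=
  ([0, 1], [(1, 2), (1, 1)], [(1, 2), (0, 0)], [[5, 6, 7], [7, 8]])

def Spec_perform_squish (arrangement : List Int) (leads : List (Int × Int)) (trails : List (Int × Int)) (blocks : List (List Int)) (out : List Int × List Int) : Prop := out = perform_squish_alt arrangement leads trails blocks
instance (arrangement : List Int) (leads : List (Int × Int)) (trails : List (Int × Int)) (blocks : List (List Int)) (out : List Int × List Int) : Decidable (Spec_perform_squish arrangement leads trails blocks out) := by unfold Spec_perform_squish; infer_instance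

-- ===== CLAIM (what is proved, stated in full; the proofs are below) =====
def Claim_equal_perform_squish : Prop := ∀ (arrangement : List Int) (leads : List (Int × Int)) (trails : List (Int × Int)) (blocks : List (List Int)), Dom_perform_squish arrangement leads trails blocks → Pre_perform_squish arrangement leads trails blocks → Spec_perform_squish arrangement leads trails blocks (perform_squish arrangement leads trails blocks)

-- ===== LEMMAS AND PROOFS =====
-- proof-only helper: the pairwise step A's fold reduces to after the first iteration
def pvBStep (blocks : List (List Int)) (s : List Int × List Int) (cm : Int × Int) : List Int × List Int :=
  (s.1 ++ pvPiece blocks cm, s.2 ++ [(s.1.length : Int) - cm.2])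

-- proof-only helper: locs entries for the tail, tracked by a running base offset
def pvLocsTail (blocks : List (List Int)) (base : Int) : List (Int × Int) → List Int
  | [] => []
  | cm :: ps => (base - cm.2) :: pvLocsTail blocks (base + ((pvPiece blocks cm).length : Int)) ps

-- proof-only helper: prefix sums of piece lengths starting from b
def pvPartialSums (b : Int) : List (List Int) → List Int
  | [] => []
  | p :: l => (b + (p.length : Int)) :: pvPartialSums (b + (p.length : Int)) l

lemma pvFold_agree (leads : List (Int × Int)) (trails : List (Int × Int)) (blocks : List (List Int)) :
    ∀ (rest : List Int) (last : Int) (out locs : List Int),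
      (let st := rest.foldl (pvAStep leads trails blocks) (out, locs, some last)
       (st.1, st.2.1)) =
      (rest.zip (((last :: rest).zip rest).map (pvMoveup leads trails))).foldl (pvBStep blocks) (out, locs) := by
  intro rest
  induction rest with
  | nil => intro last out locs; simp
  | cons c rest ih =>
      intro last out locs
      simp only [List.zip_cons_cons, List.map_cons, List.foldl_cons]
      have hA : pvAStep leads trails blocks (out, locs, some last) c =
          ((pvBStep blocks (out, locs) (c, pvMoveup leads trails (last, c))).1,
           (pvBStep blocks (out, locs) (c, pvMoveup leads trails (last, c))).2, some c) := by
        simp [pvAStep, pvBStep, pvMoveup, pvPiece]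
      rw [hA]
      exact ih c _ _

lemma pvBFold_char (blocks : List (List Int)) :
    ∀ (ps : List (Int × Int)) (out locs : List Int),
      ps.foldl (pvBStep blocks) (out, locs) =
      (out ++ (ps.map (pvPiece blocks)).flatMap id, locs ++ pvLocsTail blocks (out.length : Int) ps) := by
  intro ps
  induction ps with
  | nil => intro out locs; simp [pvLocsTail]
  | cons cm ps ih =>
      intro out locs
      simp only [List.foldl_cons]
      rw [show pvBStep blocks (out, locs) cm = (out ++ pvPiece blocks cm, locs ++ [(out.length : Int) - cm.2]) from rfl]
      rw [ih]
      simp [pvLocsTail, List.append_assoc]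

lemma pvOffsets_char :
    ∀ (l : List (List Int)) (acc : List Int) (b : Int),
      l.foldl (fun os p => os ++ [os.getLastD 0 + (p.length : Int)]) (acc ++ [b]) =
      acc ++ [b] ++ pvPartialSums b l := by
  intro l
  induction l with
  | nil => intro acc b; simp [pvPartialSums]
  | cons p l ih =>
      intro acc b
      simp only [List.foldl_cons, List.getLastD_concat]
      have := ih (acc ++ [b]) (b + (p.length : Int))
      simp only [List.append_assoc] at this ⊢
      rw [this]
      simp [pvPartialSums]

lemma pvLocs_from_sums (blocks : List (List Int)) :
    ∀ (ps : List (Int × Int)) (p0 : List Int) (b : Int),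
      ((pvPartialSums b ((p0 :: ps.map (pvPiece blocks)).dropLast)).zip (ps.map Prod.snd)).map (fun om => om.1 - om.2) =
      pvLocsTail blocks (b + (p0.length : Int)) ps := by
  intro ps
  induction ps with
  | nil => intro p0 b; simp [pvPartialSums, pvLocsTail]
  | cons cm ps ih =>
      intro p0 b
      simp only [List.map_cons, List.dropLast_cons₂, pvPartialSums, List.zip_cons_cons, List.map_cons]
      rw [ih (pvPiece blocks cm) (b + (p0.length : Int))]
      simp [pvLocsTail]

-- ===== VERDICT (by name: the statement is the Claim_ definition above) =====
theorem perform_squish_spec : Claim_equal_perform_squish := by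
  intro arrangement leads trails blocks _ _
  unfold Spec_perform_squish perform_squish perform_squish_alt
  cases arrangement with
  | nil => simp
  | cons first rest =>
      simp only [List.foldl_cons]
      have h0 : pvAStep leads trails blocks ([], [], none) first =
          (PySem.List.pyGetD blocks first [], [(0 : Int)], some first) := by
        simp [pvAStep]
      rw [h0]
      rw [pvFold_agree leads trails blocks rest first _ _]
      set moveups := ((first :: rest).zip rest).map (pvMoveup leads trails) with hm
      set ps := rest.zip moveups with hps
      have hsnd : ps.map Prod.snd = moveups := by
        apply List.map_snd_zip
        rw [hm]
        simp [List.length_zip]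
      rw [pvBFold_char blocks ps _ _]
      have hoff := pvOffsets_char ((PySem.List.pyGetD blocks first [] :: ps.map (pvPiece blocks)).dropLast) [] 0
      simp only [List.nil_append] at hoff
      rw [hoff]
      have hloc := pvLocs_from_sums blocks ps (PySem.List.pyGetD blocks first []) 0
      simp only [zero_add] at hloc
      rw [← hsnd]
      simp [hloc, List.flatMap]
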